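-- pv_equiv track=rewrite | github.com/qkdawn/map_analyse | gaode-map/modules/agent/analysis_extractors.py | _combine_signal
-- ===== SOURCE A (Python) =====
-- from typing import Any, Dict, List, Tuple
--
-- def _combine_signal(signals: List[str]) -> str:
--     filtered = [item for item in signals if item in {"strong", "moderate", "weak"}]
--     if not filtered:
--         return "unknown"
--     score = 0
--     for item in filtered:
--         if item == "strong":
--             score += 1
--         elif item == "weak":
--             score -= 1
--     if score >= 1:
--         return "strong"
--     if score <= -1:
--         return "weak"
--     return "moderate"
-- ===== SOURCE B (Python) =====
-- def _combine_signal(signals):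
--     # Cancellation stack: opposite labels ("strong"/"weak") annihilate in pairs;
--     # whatever label survives on the stack decides the outcome.
--     stack = []
--     seen = False
--     for item in signals:
--         if item == "strong" or item == "weak":
--             seen = True
--             if stack and stack[-1] != item:
--                 stack.pop()
--             else:
--                 stack.append(item)
--         elif item == "moderate":
--             seen = True
--     if not seen:
--         return "unknown"
--     if stack:
--         return stack[-1]
--     return "moderate"
-- ===== Notes on version B (the rewrite author's own statement) =====
-- stated objective: alternative
-- what changed: Replaces the filter-then-score-with-thresholds pass by a pairwise-cancellation stack (a 'strong' annihilates a 'weak' and vice versa); the label surviving on the stack is returned directly, with no score variable or threshold comparisons.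
import Mathlib
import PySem

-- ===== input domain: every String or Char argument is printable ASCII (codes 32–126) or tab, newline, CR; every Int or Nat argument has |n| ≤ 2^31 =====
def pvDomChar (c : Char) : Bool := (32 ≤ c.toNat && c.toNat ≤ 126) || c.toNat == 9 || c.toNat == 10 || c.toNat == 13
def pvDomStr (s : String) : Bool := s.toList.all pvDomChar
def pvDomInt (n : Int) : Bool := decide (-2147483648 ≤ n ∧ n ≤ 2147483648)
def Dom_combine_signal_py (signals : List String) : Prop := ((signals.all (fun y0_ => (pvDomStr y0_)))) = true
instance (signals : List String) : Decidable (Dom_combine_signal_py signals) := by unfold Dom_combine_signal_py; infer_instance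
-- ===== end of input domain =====

-- B replaces A's filter-then-score-with-thresholds pass by a pairwise-cancellation stack
-- ("strong" annihilates "weak" and vice versa); the surviving label is returned directly.
-- Same O(n) cost, a genuinely different mechanism.

-- ===== PORT A =====
def scoreLoopA (s : Int) (l : List String) : Int :=
  l.foldl (fun sc item => if item = "strong" then sc + 1 else if item = "weak" then sc - 1 else sc) s

def combine_signal_py (signals : List String) : String :=
  let filtered := signals.filter (fun item => item = "strong" || item = "moderate" || item = "weak")
  if filtered.isEmpty then "unknown"
  else
    let score := scoreLoopA 0 filtered
    if score ≥ 1 then "strong" else if score ≤ -1 then "weak" else "moderate"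

-- ===== PORT B =====
-- stack top kept at the list HEAD (Python appends/pops/reads stack[-1], the top).
def stepB (st : List String × Bool) (item : String) : List String × Bool :=
  if item = "strong" ∨ item = "weak" then
    match st.1 with
    | top :: rest => if top ≠ item then (rest, true) else (item :: top :: rest, true)
    | [] => ([item], true)
  else if item = "moderate" then (st.1, true)
  else st

def combine_signal_py_alt (signals : List String) : String :=
  let st := signals.foldl stepB ([], false)
  if st.2 = false then "unknown"
  else
    match st.1 with
    | top :: _ => top
    | [] => "moderate"

-- ===== PRECONDITION & SPEC =====
def Spec_combine_signal_py (signals : List String) (out : String) : Prop := out = combine_signal_py_alt signals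
instance (signals : List String) (out : String) : Decidable (Spec_combine_signal_py signals out) := by unfold Spec_combine_signal_py; infer_instance

-- ===== CLAIM (what is proved, stated in full; the proofs are below) =====
def Claim_equal_combine_signal_py : Prop := ∀ (signals : List String), Dom_combine_signal_py signals → Spec_combine_signal_py signals (combine_signal_py signals)

-- ===== LEMMAS AND PROOFS =====

-- abstract shape of B's stack: a homogeneous pile whose sign is the strong/weak balance
def reprS (s : Int) : List String :=
  if 0 ≤ s then List.replicate s.toNat "strong" else List.replicate (-s).toNat "weak"

lemma step_strong (s : Int) (b : Bool) : stepB (reprS s, b) "strong" = (reprS (s + 1), true) := by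
  unfold stepB reprS
  by_cases h0 : 0 ≤ s
  · rcases Int.le_iff_lt_or_eq.mp h0 with h | h
    · have : s.toNat = (s - 1).toNat + 1 := by omega
      rw [this, List.replicate_succ]
      simp only [if_pos h0, if_pos (by omega : (0:Int) ≤ s + 1)]
      have : (s + 1).toNat = ((s - 1).toNat + 1) + 1 := by omega
      simp [this, List.replicate_succ]
    · subst h; simp
  · have : (-s).toNat = (-(s + 1)).toNat + 1 := by omega
    rw [if_neg h0, this, List.replicate_succ]
    by_cases h1 : 0 ≤ s + 1
    · have hs : s + 1 = 0 := by omega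
      simp [hs, show (-(s+1)).toNat = 0 by omega]
    · simp [if_neg h1]

lemma step_weak (s : Int) (b : Bool) : stepB (reprS s, b) "weak" = (reprS (s - 1), true) := by
  unfold stepB reprS
  by_cases h0 : 0 ≤ s
  · rcases Int.le_iff_lt_or_eq.mp h0 with h | h
    · have h2 : s.toNat = (s - 1).toNat + 1 := by omega
      rw [if_pos h0, h2, List.replicate_succ]
      simp only [stepB]
      simp
      omega
    · subst h
      simp [if_neg (by omega : ¬ (0:Int) ≤ (0:Int) - 1), show (-((0:Int) - 1)).toNat = 1 by omega]
  · have : (-(s - 1)).toNat = (-s).toNat + 1 := by omega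
    rw [if_neg h0, if_neg (by omega : ¬ (0:Int) ≤ s - 1), this, List.replicate_succ]
    cases hn : (-s).toNat with
    | zero => omega
    | succ k => simp [List.replicate_succ]

lemma step_moderate (s : Int) (b : Bool) : stepB (reprS s, b) "moderate" = (reprS s, true) := by
  unfold stepB; simp

lemma step_other (s : Int) (b : Bool) (x : String) (h1 : x ≠ "strong") (h2 : x ≠ "weak")
    (h3 : x ≠ "moderate") : stepB (reprS s, b) x = (reprS s, b) := by
  unfold stepB; simp [h1, h2, h3]

lemma foldB_eq (l : List String) (s : Int) (b : Bool) :
    l.foldl stepB (reprS s, b) =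
      (reprS (s + (l.count "strong" : Int) - (l.count "weak" : Int)),
       b || decide (0 < l.count "strong" + l.count "moderate" + l.count "weak")) := by
  induction l generalizing s b with
  | nil => simp [reprS]
  | cons h t ih =>
    by_cases hs : h = "strong"
    · subst hs
      rw [List.foldl_cons, step_strong, ih, Prod.mk.injEq]
      refine ⟨by congr 1; simp [List.count_cons]; omega, ?_⟩
      simp [List.count_cons]
    · by_cases hw : h = "weak"
      · subst hw
        rw [List.foldl_cons, step_weak, ih, Prod.mk.injEq]
        refine ⟨by congr 1; simp [List.count_cons, hs]; omega, ?_⟩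
        simp [List.count_cons, hs]
      · by_cases hm : h = "moderate"
        · subst hm
          rw [List.foldl_cons, step_moderate, ih, Prod.mk.injEq]
          refine ⟨by simp [List.count_cons, hs, hw], ?_⟩
          simp [List.count_cons, hs, hw]
        · rw [List.foldl_cons, step_other _ _ _ hs hw hm, ih]
          simp [List.count_cons, hs, hw, hm]

lemma scoreLoopA_eq (l : List String) (s : Int) :
    scoreLoopA s l = s + (l.count "strong" : Int) - (l.count "weak" : Int) := by
  induction l generalizing s with
  | nil => simp [scoreLoopA]
  | cons h t ih =>
    simp only [scoreLoopA, List.foldl_cons] at *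
    by_cases hs : h = "strong"
    · subst hs; simp [ih]; omega
    · by_cases hw : h = "weak"
      · subst hw; simp [ih]; omega
      · simp [hs, hw, ih]

lemma filtered_length (l : List String) :
    (l.filter (fun item => item = "strong" || item = "moderate" || item = "weak")).length
      = l.count "strong" + l.count "moderate" + l.count "weak" := by
  induction l with
  | nil => simp
  | cons h t ih =>
    by_cases hs : h = "strong"
    · subst hs; simp [ih]; omega
    · by_cases hm : h = "moderate"
      · subst hm; simp [ih]; omega
      · by_cases hw : h = "weak"
        · subst hw; simp [ih]; omega
        · simp [List.count_cons, hs, hm, hw, ih]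

lemma filtered_count (l : List String) (a : String)
    (ha : (a = "strong" || a = "moderate" || a = "weak") = true) :
    (l.filter (fun item => item = "strong" || item = "moderate" || item = "weak")).count a
      = l.count a := by
  exact List.count_filter ha

-- ===== VERDICT (by name: the statement is the Claim_ definition above) =====
theorem combine_signal_py_spec : Claim_equal_combine_signal_py := by
  intro signals _
  unfold Spec_combine_signal_py combine_signal_py combine_signal_py_alt
  have h0 : ([] : List String) = reprS 0 := by simp [reprS]
  rw [h0, foldB_eq]
  simp only [List.isEmpty_iff_length_eq_zero, filtered_length, scoreLoopA_eq,
    filtered_count _ "strong" (by decide), filtered_count _ "weak" (by decide)]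
  set cs := signals.count "strong"
  set cm := signals.count "moderate"
  set cw := signals.count "weak"
  by_cases hz : cs + cm + cw = 0
  · simp [hz]
  · simp only [if_neg hz, Bool.false_or, decide_eq_false_iff_not, not_lt, reprS]
    rw [if_neg (by omega : ¬ (cs + cm + cw ≤ 0))]
    by_cases hpos : (0:Int) + (cs:Int) - (cw:Int) ≥ 1
    · rw [if_pos hpos, if_pos (by omega : (0:Int) ≤ 0 + (cs:Int) - (cw:Int))]
      have : ((0:Int) + cs - cw).toNat = ((0:Int) + cs - cw).toNat - 1 + 1 := by omega
      rw [this, List.replicate_succ]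
    · rw [if_neg hpos]
      by_cases hneg : (0:Int) + (cs:Int) - (cw:Int) ≤ -1
      · rw [if_pos hneg, if_neg (by omega : ¬ (0:Int) ≤ 0 + (cs:Int) - (cw:Int))]
        have : (-((0:Int) + cs - cw)).toNat = (-((0:Int) + cs - cw)).toNat - 1 + 1 := by omega
        rw [this, List.replicate_succ]
      · rw [if_neg hneg, if_pos (by omega : (0:Int) ≤ 0 + (cs:Int) - (cw:Int))]
        simp [show cs - cw = 0 by omega]
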